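-- pv_equiv track=rewrite | github.com/1Chuul/ChromeCord | ChromeCord.py | clean_chrome_title
-- ===== SOURCE A (Python) =====
-- def clean_chrome_title(title: str) -> str:
--     for suffix in [
--         " - Google Chrome",
--         " - Chrome",
--         " - google chrome",
--         " - chrome",
--     ]:
--         if title.endswith(suffix):
--             return title[:-len(suffix)].strip()
--     return title.strip()
-- ===== SOURCE B (Python) =====
-- def clean_chrome_title(title: str) -> str:
--     i = title.rfind(" - ")
--     if i != -1 and title[i + 3:] in ("Google Chrome", "Chrome", "google chrome", "chrome"):
--         return title[:i].strip()
--     return title.strip()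
-- ===== Notes on version B (the rewrite author's own statement) =====
-- stated objective: idiomatic
-- what changed: Replaces the four-suffix endswith loop by a single rfind of the separator ' - ' followed by one membership test of the tail against the four browser names.
import Mathlib
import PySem

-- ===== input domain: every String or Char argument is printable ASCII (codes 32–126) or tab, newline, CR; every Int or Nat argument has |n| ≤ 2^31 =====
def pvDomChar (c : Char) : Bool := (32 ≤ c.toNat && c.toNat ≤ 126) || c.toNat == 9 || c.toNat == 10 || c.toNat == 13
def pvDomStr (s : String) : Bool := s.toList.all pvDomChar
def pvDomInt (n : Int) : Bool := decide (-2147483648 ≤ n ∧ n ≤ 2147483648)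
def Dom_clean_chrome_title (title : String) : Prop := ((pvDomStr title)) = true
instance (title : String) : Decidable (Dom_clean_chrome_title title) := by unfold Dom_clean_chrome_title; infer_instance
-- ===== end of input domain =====

-- B replaces the four-suffix endswith loop by one rfind of " - " plus a membership
-- test of the tail (idiomatic, a single scan); return values agree on all inputs.

-- ===== PORT A =====
-- the literal suffix list of A's for-loop
def cctSuffixes : List String :=
  [" - Google Chrome", " - Chrome", " - google chrome", " - chrome"]

-- the for-loop: first matching suffix returns, else fall through to strip
def cctLoop (title : String) : List String → String
  | [] => PySem.Str.strip title
  | suffix :: rest =>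
    if PySem.Str.endswith title suffix then
      PySem.Str.strip (PySem.Str.slice title none (some (-(PySem.Str.len suffix))))
    else cctLoop title rest

def clean_chrome_title (title : String) : String := cctLoop title cctSuffixes

-- ===== PORT B =====
def clean_chrome_title_alt (title : String) : String :=
  let i := PySem.Str.rfind title " - "
  if i ≠ -1 ∧ (PySem.Str.slice title (some (i + 3)) none) ∈
      (["Google Chrome", "Chrome", "google chrome", "chrome"] : List String) then
    PySem.Str.strip (PySem.Str.slice title none (some i))
  else
    PySem.Str.strip title

-- ===== PRECONDITION & SPEC =====
def Spec_clean_chrome_title (title : String) (out : String) : Prop := out = clean_chrome_title_alt title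
instance (title : String) (out : String) : Decidable (Spec_clean_chrome_title title out) := by unfold Spec_clean_chrome_title; infer_instance

-- ===== CLAIM (what is proved, stated in full; the proofs are below) =====
def Claim_equal_clean_chrome_title : Prop := ∀ (title : String), Dom_clean_chrome_title title → Spec_clean_chrome_title title (clean_chrome_title title)

-- ===== LEMMAS AND PROOFS =====

-- the separator " - " as a character list
def cctSep : List Char := [' ', '-', ' ']

-- strip only looks at the character list
theorem cct_strip_congr (s t : String) (h : s.toList = t.toList) :
    PySem.Str.strip s = PySem.Str.strip t := by
  simp [PySem.Str.strip, h]

-- rfind.go returns -1 or a matching position ≤ x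
theorem cct_go_cases (s sub : List Char) (x : ℕ) :
    PySem.Chars.rfind.go s sub x = -1 ∨
      ∃ j : ℕ, j ≤ x ∧ PySem.Chars.rfind.go s sub x = (j : ℤ) ∧
        sub.isPrefixOf (s.drop j) = true := by
  induction x with
  | zero =>
    by_cases h : sub.isPrefixOf s = true
    · exact Or.inr ⟨0, le_refl 0, by simp [PySem.Chars.rfind.go, h], by simpa using h⟩
    · exact Or.inl (by simp [PySem.Chars.rfind.go, h])
  | succ m ih =>
    by_cases h : sub.isPrefixOf (s.drop (m + 1)) = true
    · exact Or.inr ⟨m + 1, le_refl _, by simp [PySem.Chars.rfind.go, h], h⟩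
    · have hgo : PySem.Chars.rfind.go s sub (m + 1) = PySem.Chars.rfind.go s sub m := by
        simp [PySem.Chars.rfind.go, h]
      rcases ih with h1 | ⟨j, hj, he, hp⟩
      · exact Or.inl (hgo.trans h1)
      · exact Or.inr ⟨j, Nat.le_succ_of_le hj, hgo.trans he, hp⟩

-- rfind.go finds j when j matches and nothing above j (up to x) matches
theorem cct_go_eq (s sub : List Char) (j : ℕ) :
    ∀ x : ℕ, j ≤ x → sub.isPrefixOf (s.drop j) = true →
    (∀ k : ℕ, j < k → k ≤ x → sub.isPrefixOf (s.drop k) = false) →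
    PySem.Chars.rfind.go s sub x = (j : ℤ) := by
  intro x
  induction x with
  | zero =>
    intro hj hP _
    interval_cases j
    simpa [PySem.Chars.rfind.go] using hP
  | succ m ih =>
    intro hj hP hmax
    by_cases hje : j = m + 1
    · subst hje
      simp [PySem.Chars.rfind.go, hP]
    · have hjm : j ≤ m := Nat.lt_succ_iff.mp (lt_of_le_of_ne hj hje)
      have hfalse : sub.isPrefixOf (s.drop (m + 1)) = false :=
        hmax (m + 1) (Nat.lt_succ_of_le hjm) (le_refl _)
      have : PySem.Chars.rfind.go s sub (m + 1) = PySem.Chars.rfind.go s sub m := by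
        simp [PySem.Chars.rfind.go, hfalse]
      rw [this]
      exact ih hjm hP (fun k hk hk' => hmax k hk (Nat.le_succ_of_le hk'))

-- extend a finite "no separator inside the tail" check to all positive drops
theorem cct_noSepDrop (S : List Char)
    (hchk : ∀ m ∈ List.range S.length, 0 < m → cctSep.isPrefixOf (S.drop m) = false) :
    ∀ m : ℕ, 0 < m → cctSep.isPrefixOf (S.drop m) = false := by
  intro m hm
  by_cases hlt : m < S.length
  · exact hchk m (List.mem_range.mpr hlt) hm
  · rw [List.drop_eq_nil_of_le (le_of_not_gt hlt)]
    decide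

-- the last occurrence of the separator in p ++ (cctSep ++ w) is at p.length,
-- provided cctSep does not occur strictly inside cctSep ++ w
theorem cct_rfind_append (p w : List Char)
    (hw : ∀ m : ℕ, 0 < m → cctSep.isPrefixOf ((cctSep ++ w).drop m) = false) :
    PySem.Chars.rfind (p ++ (cctSep ++ w)) cctSep = (p.length : ℤ) := by
  unfold PySem.Chars.rfind
  apply cct_go_eq
  · simp [List.length_append]
  · rw [List.drop_append]
    simp [List.isPrefixOf_iff_prefix]
  · intro k hk hk'
    rw [List.drop_append, List.drop_eq_nil_of_le (le_of_lt hk), List.nil_append]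
    exact hw (k - p.length) (Nat.sub_pos_of_lt hk)

-- prefix decomposition: b = a ++ drop |a| b when a is a prefix of b
theorem cct_prefix_decomp (a b : List Char) (h : a.isPrefixOf b = true) :
    b = a ++ b.drop a.length := by
  rcases List.isPrefixOf_iff_prefix.mp h with ⟨t, rfl⟩
  simp

-- one matching case: title = p ++ (sep ++ w), with w one of the four browser names
-- and no separator strictly inside sep ++ w; then B returns strip(p)
theorem cct_alt_of_match (title : String) (p w : List Char)
    (hT : title.toList = p ++ (cctSep ++ w))
    (hw : ∀ m : ℕ, 0 < m → cctSep.isPrefixOf ((cctSep ++ w).drop m) = false)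
    (hmem : String.ofList w ∈ (["Google Chrome", "Chrome", "google chrome", "chrome"] : List String)) :
    clean_chrome_title_alt title = PySem.Str.strip (String.ofList p) := by
  have hr : PySem.Str.rfind title " - " = (p.length : ℤ) := by
    rw [PySem.Str.rfind_eq, hT]
    have : " - ".toList = cctSep := by decide
    rw [this]
    exact cct_rfind_append p w hw
  have htail : PySem.Str.slice title (some ((p.length : ℤ) + 3)) none = String.ofList w := by
    apply String.toList_inj.mp
    rw [PySem.Str.toList_slice, String.toList_ofList]
    show PySem.List.slice title.toList (some ((p.length : ℤ) + 3)) none = w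
    rw [PySem.List.slice_from _ (by positivity)]
    have h3 : ((p.length : ℤ) + 3).toNat = p.length + 3 := by omega
    rw [h3, hT, List.drop_append]
    have : p.length + 3 - p.length = 3 := by omega
    simp [this, List.drop_eq_nil_of_le, cctSep]
  have hhead : (PySem.Str.slice title none (some (p.length : ℤ))).toList = p := by
    rw [PySem.Str.toList_slice]
    show PySem.List.slice title.toList none (some (p.length : ℤ)) = p
    rw [PySem.List.slice_to _ (by positivity), Int.toNat_natCast, hT]
    have : p = List.take p.length (p ++ (cctSep ++ w)) := (List.take_left).symm
    exact this.symm
  unfold clean_chrome_title_alt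
  rw [hr]
  have hcond : ((p.length : ℤ) ≠ -1 ∧ PySem.Str.slice title (some ((p.length : ℤ) + 3)) none ∈
      (["Google Chrome", "Chrome", "google chrome", "chrome"] : List String)) := by
    constructor
    · omega
    · rw [htail]; exact hmem
  rw [if_pos hcond]
  exact cct_strip_congr _ _ (by rw [hhead, String.toList_ofList])

-- A on a matched suffix: extract the decomposition title = p ++ suffix
theorem cct_ends_decomp (title : String) (sfx : String)
    (h : PySem.Str.endswith title sfx = true) :
    ∃ p : List Char, title.toList = p ++ sfx.toList := by
  rw [PySem.Str.endswith_eq] at h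
  rcases (PySem.Chars.endswith_iff _ _).mp h with ⟨p, hp⟩
  exact ⟨p, hp.symm⟩

-- the A-branch value for a matched suffix
theorem cct_A_branch (title sfx : String) (p : List Char)
    (hT : title.toList = p ++ sfx.toList) (hpos : 0 < sfx.toList.length) :
    PySem.Str.strip (PySem.Str.slice title none (some (-(PySem.Str.len sfx)))) =
      PySem.Str.strip (String.ofList p) := by
  apply cct_strip_congr
  rw [PySem.Str.toList_slice, String.toList_ofList]
  have hlen : PySem.Str.len sfx = (sfx.toList.length : ℤ) := by
    simp [PySem.Str.len_eq]
  rw [hlen]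
  show PySem.List.slice title.toList none (some (-(sfx.toList.length : ℤ))) = p
  rw [PySem.List.slice_to_neg_natCast _ _ hpos, hT]
  have hlen2 : (p ++ sfx.toList).length - sfx.toList.length = p.length := by
    simp [List.length_append]
  rw [hlen2]
  exact List.take_left

-- ===== VERDICT (by name: the statement is the Claim_ definition above) =====

-- a matched suffix sfx = cctSep ++ name: B returns the same stripped head as A's branch
theorem cct_case (title sfx name : String)
    (hend : PySem.Str.endswith title sfx = true)
    (hsep : sfx.toList = cctSep ++ name.toList)
    (hchk : ∀ m ∈ List.range sfx.toList.length, 0 < m →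
      cctSep.isPrefixOf (sfx.toList.drop m) = false)
    (hmem : name ∈ (["Google Chrome", "Chrome", "google chrome", "chrome"] : List String)) :
    clean_chrome_title_alt title =
      PySem.Str.strip (PySem.Str.slice title none (some (-(PySem.Str.len sfx)))) := by
  rcases cct_ends_decomp title sfx hend with ⟨p, hT⟩
  have hw : ∀ m : ℕ, 0 < m →
      cctSep.isPrefixOf ((cctSep ++ name.toList).drop m) = false := by
    intro m hm
    rw [← hsep]
    exact cct_noSepDrop _ hchk m hm
  have hT' : title.toList = p ++ (cctSep ++ name.toList) := by rw [hT, hsep]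
  have hpos : 0 < sfx.toList.length := by
    rw [hsep]
    simp [cctSep]
  rw [cct_alt_of_match title p name.toList hT' hw (by rw [String.ofList_toList]; exact hmem)]
  exact (cct_A_branch title sfx p hT hpos).symm

-- ===== VERDICT (by name: the statement is the Claim_ definition above) =====
theorem clean_chrome_title_spec : Claim_equal_clean_chrome_title := by
  intro title _
  unfold Spec_clean_chrome_title clean_chrome_title cctSuffixes
  by_cases h1 : PySem.Str.endswith title " - Google Chrome" = true
  · simp only [cctLoop, h1, if_true]
    exact (cct_case title " - Google Chrome" "Google Chrome" h1 (by decide) (by decide) (by decide)).symm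
  by_cases h2 : PySem.Str.endswith title " - Chrome" = true
  · simp only [cctLoop, h1, h2, if_true, if_false, Bool.false_eq_true]
    exact (cct_case title " - Chrome" "Chrome" h2 (by decide) (by decide) (by decide)).symm
  by_cases h3 : PySem.Str.endswith title " - google chrome" = true
  · simp only [cctLoop, h1, h2, h3, if_true, if_false, Bool.false_eq_true]
    exact (cct_case title " - google chrome" "google chrome" h3 (by decide) (by decide) (by decide)).symm
  by_cases h4 : PySem.Str.endswith title " - chrome" = true
  · simp only [cctLoop, h1, h2, h3, h4, if_true, if_false, Bool.false_eq_true]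
    exact (cct_case title " - chrome" "chrome" h4 (by decide) (by decide) (by decide)).symm
  -- no suffix matches: A returns strip(title); show B does too
  simp only [cctLoop, h1, h2, h3, h4, if_false, Bool.false_eq_true]
  unfold clean_chrome_title_alt
  by_cases hcond : (PySem.Str.rfind title " - " ≠ -1 ∧
      PySem.Str.slice title (some (PySem.Str.rfind title " - " + 3)) none ∈
        (["Google Chrome", "Chrome", "google chrome", "chrome"] : List String))
  · exfalso
    rcases hcond with ⟨hne, hmem⟩
    have hr : PySem.Str.rfind title " - " = PySem.Chars.rfind title.toList cctSep := by
      rw [PySem.Str.rfind_eq]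
      have hsep : " - ".toList = cctSep := by decide
      rw [hsep]
    rcases cct_go_cases title.toList cctSep title.toList.length with hneg | ⟨j, _, hj, hp⟩
    · exact hne (by rw [hr]; exact hneg)
    · have hrj : PySem.Str.rfind title " - " = (j : ℤ) := by
        rw [hr]
        exact hj
      have htail : (PySem.Str.slice title (some ((j : ℤ) + 3)) none).toList =
          title.toList.drop (j + 3) := by
        rw [PySem.Str.toList_slice]
        show PySem.List.slice title.toList (some ((j : ℤ) + 3)) none =
          title.toList.drop (j + 3)
        rw [PySem.List.slice_from _ (by positivity)]
        have h3 : ((j : ℤ) + 3).toNat = j + 3 := by omega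
        rw [h3]
      rw [hrj] at hmem
      have hdecomp : title.toList.drop j = cctSep ++ title.toList.drop (j + 3) := by
        have hd := cct_prefix_decomp cctSep (title.toList.drop j) hp
        rw [hd, List.drop_drop]
        simp [cctSep]
      have hsuffix : (cctSep ++ title.toList.drop (j + 3)) <:+ title.toList := by
        rw [← hdecomp]
        exact List.drop_suffix j title.toList
      have hends : ∀ sfx : String, sfx.toList = cctSep ++ title.toList.drop (j + 3) →
          PySem.Str.endswith title sfx = true := by
        intro sfx hsfx
        rw [PySem.Str.endswith_eq, PySem.Chars.endswith_iff, hsfx]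
        exact hsuffix
      rcases List.mem_cons.mp hmem with he | hmem2
      · have hdw : title.toList.drop (j + 3) = "Google Chrome".toList := by
          rw [← htail, he]
        exact h1 (hends " - Google Chrome" (by rw [hdw]; decide))
      rcases List.mem_cons.mp hmem2 with he | hmem3
      · have hdw : title.toList.drop (j + 3) = "Chrome".toList := by
          rw [← htail, he]
        exact h2 (hends " - Chrome" (by rw [hdw]; decide))
      rcases List.mem_cons.mp hmem3 with he | hmem4
      · have hdw : title.toList.drop (j + 3) = "google chrome".toList := by
          rw [← htail, he]
        exact h3 (hends " - google chrome" (by rw [hdw]; decide))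
      rcases List.mem_cons.mp hmem4 with he | habs
      · have hdw : title.toList.drop (j + 3) = "chrome".toList := by
          rw [← htail, he]
        exact h4 (hends " - chrome" (by rw [hdw]; decide))
      simp at habs
  · rw [if_neg hcond]
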